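-- pv_equiv track=rewrite | github.com/harshutkarshmishra1998/RAG_QA | answer_generation/answer_generation_v2.py | page_ranges
-- ===== SOURCE A (Python) =====
-- def page_ranges(pages):
--     if not pages:
--         return "unknown"
--     pages = sorted(pages)
--     ranges = []
--     s = pages[0]
--     p = pages[0]
--
--     for x in pages[1:]:
--         if x == p + 1:
--             p = x
--         else:
--             ranges.append((s, p))
--             s = x
--             p = x
--     ranges.append((s, p))
--
--     return ", ".join(str(a) if a == b else f"{a}-{b}" for a, b in ranges)
-- ===== SOURCE B (Python) =====
-- from itertools import groupby
--
--
-- def page_ranges(pages):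
--     if not pages:
--         return "unknown"
--     parts = []
--     for _, grp in groupby(enumerate(sorted(pages)), key=lambda t: t[1] - t[0]):
--         vals = [v for _, v in grp]
--         parts.append(str(vals[0]) if vals[0] == vals[-1] else f"{vals[0]}-{vals[-1]}")
--     return ", ".join(parts)
-- ===== Notes on version B (the rewrite author's own statement) =====
-- stated objective: idiomatic
-- what changed: Replaces A's hand-rolled prev/run-start state machine with itertools.groupby over enumerate(sorted(pages)) keyed on value-minus-index, so maximal consecutive runs fall out as groups of a constant derived key and are formatted from each group's first and last value.
import Mathlib
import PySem

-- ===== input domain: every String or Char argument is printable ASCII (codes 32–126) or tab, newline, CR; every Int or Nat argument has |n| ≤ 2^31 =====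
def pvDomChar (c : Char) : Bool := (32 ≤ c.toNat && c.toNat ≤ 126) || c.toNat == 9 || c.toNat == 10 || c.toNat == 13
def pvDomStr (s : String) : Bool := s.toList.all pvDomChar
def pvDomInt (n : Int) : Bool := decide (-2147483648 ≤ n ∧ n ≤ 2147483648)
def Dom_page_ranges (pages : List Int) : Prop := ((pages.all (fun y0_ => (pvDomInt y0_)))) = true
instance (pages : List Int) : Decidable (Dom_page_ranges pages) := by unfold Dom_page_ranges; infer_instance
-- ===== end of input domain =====

-- B replaces A's prev/run-start state machine by grouping enumerate(sorted(pages)) on the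
-- derived key value-minus-index (itertools.groupby), formatting each group from its first
-- and last value (objective: idiomatic).

-- ===== PORT A =====
-- A: guard, sort, then a single fold carrying (ranges, s, p); append the last run; join.
def page_ranges (pages : List Int) : String :=
  if pages = [] then "unknown"
  else
    match PySem.List.sorted pages (fun x => x) false with
    | [] => "unknown"  -- unreachable: sorted of a nonempty list is nonempty
    | x :: rest =>
      let st := rest.foldl
        (fun (st : List (Int × Int) × Int × Int) y =>
          if y = st.2.2 + 1 then (st.1, st.2.1, y)
          else (st.1 ++ [(st.2.1, st.2.2)], y, y)) ([], x, x)
      let ranges := st.1 ++ [(st.2.1, st.2.2)]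
      PySem.Str.join ", " (ranges.map (fun ab =>
        if ab.1 = ab.2 then PySem.Int.toStr ab.1
        else PySem.Int.toStr ab.1 ++ "-" ++ PySem.Int.toStr ab.2))

-- ===== PORT B =====
-- Hand port of itertools.groupby with key = lambda t: t[1] - t[0] over the enumerated pairs:
-- a group collects elements while the key equals the group's first key (exactly CPython's
-- tgtkey rule; here key equality is transitive so this matches adjacent-key grouping too).
-- gbTake returns the rest of the current group's VALUES (Source B's 'vals') and the remainder.
def gbTake (k : Int) : List (Int × Int) → List Int × List (Int × Int)
  | [] => ([], [])
  | t :: ts =>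
    if t.2 - t.1 = k then
      let r := gbTake k ts
      (t.2 :: r.1, r.2)
    else ([], t :: ts)

theorem gbTake_len (ts : List (Int × Int)) : ∀ (k : Int), (gbTake k ts).2.length ≤ ts.length := by
  induction ts with
  | nil => intro k; simp [gbTake]
  | cons t ts ih =>
    intro k
    by_cases h : t.2 - t.1 = k
    · simp only [gbTake, if_pos h]
      exact Nat.le_succ_of_le (ih k)
    · simp [gbTake, h]

-- The stream of groups (as value lists) that groupby yields.
def gbGroups : List (Int × Int) → List (List Int)
  | [] => []
  | t :: ts =>
    let r := gbTake (t.2 - t.1) ts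
    (t.2 :: r.1) :: gbGroups r.2
termination_by ts => ts.length
decreasing_by exact Nat.lt_succ_of_le (gbTake_len ts (t.2 - t.1))

-- vals[0] / vals[-1]; every group groupby yields is nonempty, so the defaults are never used.
def fmtGroup (vals : List Int) : String :=
  let a := vals.headD 0
  let b := vals.getLastD 0
  if a = b then PySem.Int.toStr a else PySem.Int.toStr a ++ "-" ++ PySem.Int.toStr b

def page_ranges_alt (pages : List Int) : String :=
  if pages = [] then "unknown"
  else
    PySem.Str.join ", "
      ((gbGroups (PySem.List.enumerate (PySem.List.sorted pages (fun x => x) false) 0)).map fmtGroup)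

-- ===== PRECONDITION & SPEC =====
def Spec_page_ranges (pages : List Int) (out : String) : Prop := out = page_ranges_alt pages
instance (pages : List Int) (out : String) : Decidable (Spec_page_ranges pages out) := by unfold Spec_page_ranges; infer_instance

-- ===== CLAIM =====
def Claim_equal_page_ranges : Prop := ∀ (pages : List Int), Dom_page_ranges pages → Spec_page_ranges pages (page_ranges pages)

-- ===== LEMMAS AND PROOFS =====

-- The (start, end) runs produced from run start s, previous element p and the remaining input:
-- the common characterisation both ports are reduced to.
def runsW (s p : Int) : List Int → List (Int × Int)
  | [] => [(s, p)]
  | y :: ys => if y = p + 1 then runsW s y ys else (s, p) :: runsW y y ys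

def fmtP (ab : Int × Int) : String :=
  if ab.1 = ab.2 then PySem.Int.toStr ab.1
  else PySem.Int.toStr ab.1 ++ "-" ++ PySem.Int.toStr ab.2

-- A's fold, finalised by appending the pending run, yields acc ++ runsW s p ys.
theorem foldA_eq_runsW (ys : List Int) : ∀ (acc : List (Int × Int)) (s p : Int),
    (let st := ys.foldl
        (fun (st : List (Int × Int) × Int × Int) y =>
          if y = st.2.2 + 1 then (st.1, st.2.1, y)
          else (st.1 ++ [(st.2.1, st.2.2)], y, y)) (acc, s, p)
     st.1 ++ [(st.2.1, st.2.2)]) = acc ++ runsW s p ys := by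
  induction ys with
  | nil => intro acc s p; simp [runsW]
  | cons y ys ih =>
    intro acc s p
    by_cases h : y = p + 1
    · simpa [List.foldl_cons, h, runsW] using ih acc s y
    · simpa [List.foldl_cons, h, runsW] using ih (acc ++ [(s, p)]) y y

-- Spec of one maximal consecutive run: values collected after p, its end, the remaining input.
def ext (p : Int) : List Int → List Int × Int × List Int
  | [] => ([], p, [])
  | y :: ys => if y = p + 1 then let r := ext y ys; (y :: r.1, r.2) else ([], p, y :: ys)

-- gbTake on an enumerated suffix is exactly ext: key equality x - i = p - s ↔ x = p + (i - s).
theorem gbTake_eq_ext (ys : List Int) : ∀ (s p : Int),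
    gbTake (p - s) (PySem.List.enumerate ys (s + 1)) =
      ((ext p ys).1, PySem.List.enumerate (ext p ys).2.2 (s + 1 + (ext p ys).1.length)) := by
  induction ys with
  | nil => intro s p; simp [PySem.List.enumerate_nil, gbTake, ext]
  | cons y ys ih =>
    intro s p
    rw [PySem.List.enumerate_cons]
    by_cases h : y = p + 1
    · have hk : y - (s + 1) = p - s := by omega
      have := ih (s + 1) y
      simp only [gbTake, ext, if_pos h]
      rw [if_pos hk, show p - s = y - (s + 1) from hk.symm, this]
      simp only [List.length_cons]
      refine congrArg (Prod.mk _) (congrArg (fun i => PySem.List.enumerate (ext y ys).2.2 i) ?_)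
      push_cast
      ring
    · have hk : ¬ y - (s + 1) = p - s := by omega
      simp only [gbTake, if_neg hk, ext, if_neg h, List.length_nil]
      rw [PySem.List.enumerate_cons]
      norm_num

theorem getLast_ext (ys : List Int) : ∀ (p : Int), (p :: (ext p ys).1).getLast?.getD 0 = (ext p ys).2.1 := by
  induction ys with
  | nil => intro p; simp [ext]
  | cons y ys ih =>
    intro p
    by_cases h : y = p + 1
    · simpa [ext, h] using ih y
    · simp [ext, h]

theorem runsW_eq_ext (ys : List Int) : ∀ (s p : Int),
    runsW s p ys = (s, (ext p ys).2.1) ::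
      (match (ext p ys).2.2 with
       | [] => []
       | y :: ys' => runsW y y ys') := by
  induction ys with
  | nil => intro s p; simp [runsW, ext]
  | cons y ys ih =>
    intro s p
    by_cases h : y = p + 1
    · simpa [runsW, ext, h] using ih s y
    · simp [runsW, ext, h]

-- Main bridge: groupby over the enumeration of x :: ys (from any start index) formats the runsW pairs.
theorem gbGroups_eq_runsW (n : Nat) : ∀ (ys : List Int), ys.length ≤ n → ∀ (x s : Int),
    (gbGroups (PySem.List.enumerate (x :: ys) s)).map fmtGroup = (runsW x x ys).map fmtP := by
  induction n with
  | zero =>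
    intro ys hy x s
    have : ys = [] := List.eq_nil_of_length_eq_zero (Nat.le_zero.mp hy)
    subst this
    simp [PySem.List.enumerate_cons, PySem.List.enumerate_nil, gbGroups, gbTake, runsW, fmtGroup,
      fmtP]
  | succ n ih =>
    intro ys hy x s
    rw [PySem.List.enumerate_cons, gbGroups]
    have hg := gbTake_eq_ext ys s x
    simp only [hg]
    rw [runsW_eq_ext]
    have hfmt : fmtGroup (x :: (ext x ys).1) = fmtP (x, (ext x ys).2.1) := by
      simp [fmtGroup, fmtP, getLast_ext ys x]
    have hlen : (ext x ys).2.2.length ≤ ys.length := by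
      clear hg hfmt hy
      induction ys generalizing x with
      | nil => simp [ext]
      | cons y ys ih2 =>
        by_cases h : y = x + 1
        · simp only [ext, if_pos h]
          exact Nat.le_succ_of_le (ih2 y)
        · simp [ext, h]
    match hrest : (ext x ys).2.2 with
    | [] => simp [PySem.List.enumerate_nil, gbGroups, hfmt]
    | y :: ys' =>
      rw [hrest] at hlen
      have hy' : ys'.length ≤ n := by
        simp at hlen; omega
      simp only [List.map_cons, hfmt, ih ys' hy' y _]

-- ===== VERDICT =====
theorem page_ranges_spec : Claim_equal_page_ranges := by
  intro pages _
  unfold Spec_page_ranges page_ranges page_ranges_alt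
  by_cases hp : pages = []
  · simp [hp]
  · simp only [if_neg hp]
    have hs : PySem.List.sorted pages (fun x => x) false ≠ [] := by
      simpa [PySem.List.sorted_eq_nil_iff] using hp
    obtain ⟨x, rest, he⟩ := List.exists_cons_of_ne_nil hs
    rw [he, gbGroups_eq_runsW rest.length rest (Nat.le_refl _) x 0]
    have hA := foldA_eq_runsW rest [] x x
    simp only [List.nil_append] at hA
    simp only [hA]
    have hf : (fun ab : Int × Int => if ab.1 = ab.2 then PySem.Int.toStr ab.1
        else PySem.Int.toStr ab.1 ++ "-" ++ PySem.Int.toStr ab.2) = fmtP := by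
      funext ab; simp [fmtP]
    rw [hf]
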